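-- pv_equiv track=rewrite | github.com/walz0/ch-chart-gen | main.py | mark_syllables
-- ===== SOURCE A (Python) =====
-- def mark_syllables(word):
--     word = word.lower()
--     syllables = {}
--     vowels = "aeiouy"
--     # consonants that continue the syllable
--     cont_consonants = "cerx"
--     if word[0] in vowels:
--         # count += 1
--         syllables[0] = word[0]
--     for index in range(1, len(word)):
--         if word[index] in vowels and word[index - 1] not in vowels:
--             # count += 1
--             if index < len(word) - 1:
--                 if word[index+1] in cont_consonants:
--                     syllables[index+1] = word[index+1]
--                     continue
--             syllables[index] = word[index]
--
--     # return word if there is only 1 syllable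
--     if len(syllables) == 0:
--         return word
--
--     output = ""
--     # place syllable markers
--     prev = 0
--     for i in range(len(list(syllables.keys()))):
--         index = list(syllables.keys())[i]
--         if i == len(list(syllables.keys())) - 1:
--             output += word[prev:len(word)]
--             continue
--         output += word[prev:index+1] + "-"
--         prev = index+1
--
--     return output
-- ===== SOURCE B (Python) =====
-- def mark_syllables(word):
--     # Single pass with a per-position boundary predicate; no dict, no slicing loop.
--     w = word.lower()
--     vowels = "aeiouy"
--     cont = "cerx"
--     n = len(w)
--
--     def is_key(j):
--         if j == 0:
--             return w[0] in vowels
--         if w[j] in vowels and w[j - 1] not in vowels: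
--             return not (j < n - 1 and w[j + 1] in cont)
--         return j >= 2 and w[j] in cont and w[j - 1] in vowels and w[j - 2] not in vowels
--
--     last = next((j for j in range(n - 1, -1, -1) if is_key(j)), -1)
--     if last == -1:
--         return w
--     return "".join(w[j] + ("-" if j != last and is_key(j) else "") for j in range(n))
-- ===== Notes on version B (the rewrite author's own statement) =====
-- stated objective: faster
-- what changed: Replaces the two-phase design (mutable dict of syllable keys, then a second loop that rebuilds list(syllables.keys()) every iteration and slices with a prev accumulator) by a stateless per-position boundary predicate (folding the dict's index+1 shift into a lookback case) and a single join emitting each character plus a dash at every non-final boundary.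
import Mathlib
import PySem

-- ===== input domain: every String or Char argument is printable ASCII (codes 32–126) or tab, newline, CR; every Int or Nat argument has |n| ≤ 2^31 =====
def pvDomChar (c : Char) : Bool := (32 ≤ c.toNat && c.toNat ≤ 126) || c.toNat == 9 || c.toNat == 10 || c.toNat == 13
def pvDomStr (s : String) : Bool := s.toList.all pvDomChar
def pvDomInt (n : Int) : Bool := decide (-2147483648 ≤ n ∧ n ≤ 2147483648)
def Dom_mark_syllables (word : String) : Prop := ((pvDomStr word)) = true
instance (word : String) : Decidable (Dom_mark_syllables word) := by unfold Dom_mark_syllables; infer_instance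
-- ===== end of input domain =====

-- B replaces A's two-phase dict-then-slice design by a stateless per-position boundary
-- predicate and a single join (alternative decomposition).


-- characters of the shared literal constants vowels = "aeiouy", cont_consonants = "cerx"
def isVowel (c : Char) : Bool := ("aeiouy".toList).contains c
def isCont (c : Char) : Bool := ("cerx".toList).contains c

-- ===== PORT A =====
-- step-for-step: build the dict `syllables`, then re-walk list(syllables.keys()) with prev/output
-- body of A's first loop (over index in range(1, len(word)))
def sylStep (w : List Char) (d : PySem.Dict Int Char) (index : Int) : PySem.Dict Int Char :=
  if isVowel (PySem.List.pyGetD w index ' ') && !isVowel (PySem.List.pyGetD w (index - 1) ' ') then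
    if decide (index < PySem.List.len w - 1) && isCont (PySem.List.pyGetD w (index + 1) ' ') then
      d.insert (index + 1) (PySem.List.pyGetD w (index + 1) ' ')
    else
      d.insert index (PySem.List.pyGetD w index ' ')
  else d

-- body of A's second loop (over i in range(len(list(syllables.keys())))), state = (output, prev)
def outStep (w : List Char) (ks : List Int) (st : List Char × Int) (i : Int) : List Char × Int :=
  let index := PySem.List.pyGetD ks i 0
  if i = PySem.List.len ks - 1 then
    (st.1 ++ PySem.List.slice w (some st.2) (some (PySem.List.len w)), st.2)
  else
    (st.1 ++ PySem.List.slice w (some st.2) (some (index + 1)) ++ ['-'], index + 1)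

def mark_syllables (word : String) : String :=
  let w := PySem.Chars.lower word.toList
  match PySem.List.pyGet? w 0 with
  | none => ""              -- Python raises IndexError here (empty word, outside Pre_)
  | some c0 =>
    let syl0 : PySem.Dict Int Char :=
      if isVowel c0 then (PySem.Dict.empty).insert 0 c0 else PySem.Dict.empty
    let syl := (PySem.List.pyRange 1 (PySem.List.len w) 1).foldl (sylStep w) syl0
    if PySem.Dict.size syl = 0 then String.ofList w
    else
      let ks := PySem.Dict.keys syl
      let res := (PySem.List.pyRange 0 (PySem.List.len ks) 1).foldl (outStep w ks) ([], 0)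
      String.ofList res.1

-- ===== PORT B =====
-- B's boundary predicate is_key(j) (closure over w, n)
def isKeyB (w : List Char) (j : Int) : Bool :=
  if j = 0 then isVowel (PySem.List.pyGetD w 0 ' ')
  else if isVowel (PySem.List.pyGetD w j ' ') && !isVowel (PySem.List.pyGetD w (j - 1) ' ') then
    !(decide (j < PySem.List.len w - 1) && isCont (PySem.List.pyGetD w (j + 1) ' '))
  else
    decide (2 ≤ j) && isCont (PySem.List.pyGetD w j ' ') &&
      isVowel (PySem.List.pyGetD w (j - 1) ' ') && !isVowel (PySem.List.pyGetD w (j - 2) ' ')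

def mark_syllables_alt (word : String) : String :=
  let w := PySem.Chars.lower word.toList
  let n : Int := PySem.List.len w
  let last : Int := ((PySem.List.pyRange (n - 1) (-1) (-1)).find? (fun j => isKeyB w j)).getD (-1)
  if last = -1 then String.ofList w
  else String.ofList (PySem.Chars.join [] ((PySem.List.pyRange 0 n 1).map (fun j =>
    [PySem.List.pyGetD w j ' '] ++ (if decide (j ≠ last) && isKeyB w j then ['-'] else []))))

-- ===== PRECONDITION & SPEC =====
-- A indexes word[0] unconditionally: it raises IndexError exactly on the empty string.
def Pre_mark_syllables (word : String) : Prop := word ≠ ""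
instance (word : String) : Decidable (Pre_mark_syllables word) := by unfold Pre_mark_syllables; infer_instance

def pvWitness_mark_syllables : String := "banana"

def Spec_mark_syllables (word : String) (out : String) : Prop := out = mark_syllables_alt word
instance (word : String) (out : String) : Decidable (Spec_mark_syllables word out) := by unfold Spec_mark_syllables; infer_instance

-- ===== CLAIM (what is proved, stated in full; the proofs are below) =====
def Claim_equal_mark_syllables : Prop := ∀ (word : String), Dom_mark_syllables word → Pre_mark_syllables word → Spec_mark_syllables word (mark_syllables word)

-- ===== LEMMAS AND PROOFS =====

-- the list of boundary positions, as B's predicate selects them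
def keyList (w : List Char) : List Nat :=
  (List.range w.length).filter (fun (j : Nat) => isKeyB w (j : Int))

-- the vowel/non-vowel test of A's first loop at Nat position m
def cond1 (w : List Char) (m : Nat) : Bool :=
  isVowel (w.getD m ' ') && !isVowel (w.getD (m - 1) ' ')

-- the 'cerx' lookahead test of A's first loop at Nat position m
def cond2 (w : List Char) (m : Nat) : Bool :=
  decide ((m : Int) < (w.length : Int) - 1) && isCont (w.getD (m + 1) ' ')

-- "iteration of A's first loop at index i inserted the shifted key i+1"
def shifted (w : List Char) (i : Nat) : Bool :=
  decide (1 ≤ i) && cond1 w i && cond2 w i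

-- the syllable segments of w cut after each key (dash separated), starting at prev
def segs (w : List Char) : Nat → List Nat → List Char
  | _, [] => []
  | prev, [_] => w.drop prev
  | prev, k :: k2 :: rest => ((w.drop prev).take (k + 1 - prev) ++ ['-']) ++ segs w (k + 1) (k2 :: rest)

-- outStep with the enumerated pair (i, ks[i]) made explicit
def outStep' (w : List Char) (L : Int) (st : List Char × Int) (p : Int × Int) : List Char × Int :=
  if p.1 = L - 1 then
    (st.1 ++ PySem.List.slice w (some st.2) (some (PySem.List.len w)), st.2)
  else
    (st.1 ++ PySem.List.slice w (some st.2) (some (p.2 + 1)) ++ ['-'], p.2 + 1)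

theorem pyGetD_cast_sub_one (w : List Char) (m : Nat) (hm : 1 ≤ m) :
    PySem.List.pyGetD w ((m : Int) - 1) ' ' = w.getD (m - 1) ' ' := by
  rw [show (m : Int) - 1 = ((m - 1 : Nat) : Int) by omega, PySem.List.pyGetD_natCast]

theorem pyGetD_cast_add_one (w : List Char) (m : Nat) :
    PySem.List.pyGetD w ((m : Int) + 1) ' ' = w.getD (m + 1) ' ' := by
  rw [show (m : Int) + 1 = ((m + 1 : Nat) : Int) by omega, PySem.List.pyGetD_natCast]

theorem sylStep_eq_of_shift (w : List Char) (d : PySem.Dict Int Char) (m : Nat) (hm : 1 ≤ m)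
    (h1 : cond1 w m = true) (h2 : cond2 w m = true) :
    sylStep w d (m : Int) = d.insert ((m + 1 : Nat) : Int) (w.getD (m + 1) ' ') := by
  unfold sylStep
  unfold cond1 at h1
  unfold cond2 at h2
  rw [pyGetD_cast_sub_one w m hm, pyGetD_cast_add_one w m, PySem.List.pyGetD_natCast,
    PySem.List.len_eq, if_pos h1, if_pos h2,
    show (m : Int) + 1 = ((m + 1 : Nat) : Int) by omega]

theorem sylStep_eq_of_key (w : List Char) (d : PySem.Dict Int Char) (m : Nat) (hm : 1 ≤ m)
    (h1 : cond1 w m = true) (h2 : cond2 w m = false) :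
    sylStep w d (m : Int) = d.insert ((m : Nat) : Int) (w.getD m ' ') := by
  unfold sylStep
  unfold cond1 at h1
  unfold cond2 at h2
  rw [pyGetD_cast_sub_one w m hm, pyGetD_cast_add_one w m, PySem.List.pyGetD_natCast,
    PySem.List.len_eq, if_pos h1, if_neg (by rw [h2]; simp)]

theorem sylStep_eq_of_skip (w : List Char) (d : PySem.Dict Int Char) (m : Nat) (hm : 1 ≤ m)
    (h1 : cond1 w m = false) :
    sylStep w d (m : Int) = d := by
  unfold sylStep
  unfold cond1 at h1
  rw [pyGetD_cast_sub_one w m hm, PySem.List.pyGetD_natCast, if_neg (by rw [h1]; simp)]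

theorem isKeyB_zero (w : List Char) : isKeyB w ((0 : Nat) : Int) = isVowel (w.getD 0 ' ') := by
  rw [show ((0 : Nat) : Int) = (0 : Int) by simp]
  unfold isKeyB
  rw [if_pos rfl, PySem.List.pyGetD_zero]

theorem isKeyB_pos (w : List Char) (m : Nat) (hm : 1 ≤ m) (h1 : cond1 w m = true) :
    isKeyB w (m : Int) = !(cond2 w m) := by
  unfold isKeyB
  unfold cond1 at h1
  unfold cond2
  rw [if_neg (by omega), pyGetD_cast_sub_one w m hm, pyGetD_cast_add_one w m,
    PySem.List.pyGetD_natCast, PySem.List.len_eq, if_pos h1]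

theorem isKeyB_neg (w : List Char) (m : Nat) (hm : 1 ≤ m) (hmn : m < w.length)
    (h1 : cond1 w m = false) :
    isKeyB w (m : Int) = shifted w (m - 1) := by
  unfold isKeyB
  unfold cond1 at h1
  rw [if_neg (by omega), pyGetD_cast_sub_one w m hm, PySem.List.pyGetD_natCast,
    if_neg (by rw [h1]; simp)]
  unfold shifted cond1 cond2
  by_cases h2 : 2 ≤ m
  · rw [show (m : Int) - 2 = ((m - 2 : Nat) : Int) by omega, PySem.List.pyGetD_natCast]
    have e1 : decide (2 ≤ (m : Int)) = true := by simp; omega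
    have e2 : decide (1 ≤ m - 1) = true := by simp; omega
    have e3 : decide (((m - 1 : Nat) : Int) < (w.length : Int) - 1) = true := by simp; omega
    have e4 : m - 1 - 1 = m - 2 := by omega
    have e5 : m - 1 + 1 = m := by omega
    rw [e1, e2, e3, e4, e5]
    cases hA : isCont (w.getD m ' ') <;>
      cases hB : isVowel (w.getD (m - 1) ' ') <;>
        cases hC : isVowel (w.getD (m - 2) ' ') <;> simp
  · have hm1 : m = 1 := by omega
    subst hm1
    have e1 : decide (2 ≤ ((1 : Nat) : Int)) = false := by simp
    have e2 : decide (1 ≤ 1 - 1) = false := by simp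
    rw [e1, e2]
    simp

theorem shifted_false_of_not_vowel (w : List Char) (i : Nat)
    (h : isVowel (w.getD i ' ') = false) : shifted w i = false := by
  have h' : isVowel (w[i]?.getD ' ') = false := by
    rw [← List.getD_eq_getElem?_getD]
    exact h
  simp [shifted, cond1, h']

theorem shifted_false_of_cond1_false (w : List Char) (i : Nat)
    (h : cond1 w i = false) : shifted w i = false := by
  simp [shifted, h]

theorem shifted_false_of_cond2_false (w : List Char) (i : Nat)
    (h : cond2 w i = false) : shifted w i = false := by
  simp [shifted, h]

theorem shifted_true (w : List Char) (i : Nat) (hi : 1 ≤ i)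
    (h1 : cond1 w i = true) (h2 : cond2 w i = true) : shifted w i = true := by
  simp [shifted, h1, h2, hi]

-- A's first loop: the dict after processing indices 1..m-1
theorem sylA_items (w : List Char) (c0 : Char) (h0 : w.getD 0 ' ' = c0) (m : Nat)
    (h1 : 1 ≤ m) (hm : m ≤ w.length) :
    ((PySem.List.pyRange 1 (m : Int) 1).foldl (sylStep w)
        (if isVowel c0 then (PySem.Dict.empty).insert 0 c0 else PySem.Dict.empty)).items
      = (((List.range m).filter (fun (j : Nat) => isKeyB w (j : Int))).map
            (fun (j : Nat) => ((j : Int), w.getD j ' ')))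
        ++ (if shifted w (m - 1) then [((m : Int), w.getD m ' ')] else []) := by
  induction m, h1 using Nat.le_induction with
  | base =>
    rw [PySem.List.pyRange_one_eq_nil (by omega)]
    simp only [List.foldl_nil, List.range_one, List.filter_cons, List.filter_nil]
    rw [show shifted w (1 - 1) = false by simp [shifted]]
    rw [isKeyB_zero w, h0]
    by_cases hv : isVowel c0 = true
    · rw [if_pos hv, if_pos hv]
      rw [PySem.Dict.items_insert_of_not_contains]
      · have h0' : w[0]?.getD ' ' = c0 := by
          rw [← List.getD_eq_getElem?_getD]
          exact h0
        simp [PySem.Dict.empty, h0']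
      · simp [PySem.Dict.contains_empty]
    · rw [if_neg hv, if_neg hv]
      simp [PySem.Dict.empty]
  | succ m hm1 ih =>
    have hmn : m < w.length := by omega
    have hD := ih (by omega)
    rw [show ((m + 1 : Nat) : Int) = (m : Int) + 1 by push_cast; ring]
    rw [PySem.List.pyRange_one_succ_right (by omega : (1 : Int) ≤ (m : Int))]
    rw [List.foldl_append, List.foldl_cons, List.foldl_nil]
    set D := ((PySem.List.pyRange 1 (m : Int) 1).foldl (sylStep w)
        (if isVowel c0 = true then (PySem.Dict.empty).insert 0 c0 else PySem.Dict.empty)) with hDdef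
    have hkeys : D.keys
        = (((List.range m).filter (fun (j : Nat) => isKeyB w (j : Int))).map
            (fun (j : Nat) => (j : Int)))
          ++ (if shifted w (m - 1) then [((m : Int))] else []) := by
      show D.items.map Prod.fst = _
      rw [hD, List.map_append, List.map_map]
      congr 1
      by_cases hs : shifted w (m - 1) = true <;> simp [hs]
    rw [List.range_succ, List.filter_append, List.map_append]
    rw [show (m + 1) - 1 = m by omega]
    by_cases c1 : cond1 w m = true
    · have hc1 := c1
      unfold cond1 at hc1
      have hnv : isVowel (w.getD (m - 1) ' ') = false := by
        have := (Bool.and_eq_true _ _).mp hc1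
        simpa using this.2
      have hsm1 : shifted w (m - 1) = false := shifted_false_of_not_vowel w (m - 1) hnv
      rw [hsm1] at hD hkeys
      simp only [Bool.false_eq_true, if_false, List.append_nil] at hD hkeys
      by_cases c2 : cond2 w m = true
      · rw [sylStep_eq_of_shift w D m (by omega) c1 c2]
        have hkB : isKeyB w ((m : Nat) : Int) = false := by
          rw [isKeyB_pos w m (by omega) c1, c2]
          rfl
        rw [PySem.Dict.items_insert_of_not_contains]
        · rw [hD, shifted_true w m (by omega) c1 c2]
          simp only [List.filter_cons, List.filter_nil, hkB, Bool.false_eq_true, if_false,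
            List.map_nil, List.append_nil, if_true]
          push_cast
          rfl
        · rw [PySem.Dict.contains_eq_decide_mem_keys, hkeys]
          simp only [decide_eq_false_iff_not, List.mem_map, List.mem_filter, List.mem_range]
          rintro ⟨j, ⟨hj, _⟩, hje⟩
          omega
      · have c2' : cond2 w m = false := by
          cases h : cond2 w m
          · rfl
          · exact absurd h c2
        rw [sylStep_eq_of_key w D m (by omega) c1 c2']
        have hkB : isKeyB w ((m : Nat) : Int) = true := by
          rw [isKeyB_pos w m (by omega) c1, c2']
          rfl
        rw [PySem.Dict.items_insert_of_not_contains]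
        · rw [hD, shifted_false_of_cond2_false w m c2']
          simp only [List.filter_cons, List.filter_nil, hkB, if_true,
            List.map_cons, List.map_nil, List.append_nil, Bool.false_eq_true, if_false]
        · rw [PySem.Dict.contains_eq_decide_mem_keys, hkeys]
          simp only [decide_eq_false_iff_not, List.mem_map, List.mem_filter, List.mem_range]
          rintro ⟨j, ⟨hj, _⟩, hje⟩
          omega
    · have c1' : cond1 w m = false := by
        cases h : cond1 w m
        · rfl
        · exact absurd h c1
      rw [sylStep_eq_of_skip w D m (by omega) c1']
      rw [hD]
      have hkB : isKeyB w ((m : Nat) : Int) = shifted w (m - 1) :=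
        isKeyB_neg w m (by omega) hmn c1'
      rw [shifted_false_of_cond1_false w m c1']
      simp only [Bool.false_eq_true, if_false, List.append_nil]
      rw [List.filter_cons, List.filter_nil, hkB]
      by_cases hs : shifted w (m - 1) = true
      · simp only [hs, if_true, List.map_cons, List.map_nil]
      · simp only [hs, Bool.false_eq_true, if_false, List.map_nil, List.append_nil]

-- A's second loop produces the dash-separated segments
theorem outA_loop (w : List Char) (L : Nat) :
    ∀ (suf : List Nat) (s : Int) (acc : List Char) (prev : Nat),
      suf ≠ [] → s + suf.length = (L : Int) →
      (∀ k ∈ suf, k < w.length) → (∀ k ∈ suf, prev ≤ k) → suf.Pairwise (· < ·) →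
      ((PySem.List.enumerate (suf.map (fun (j : Nat) => (j : Int))) s).foldl
          (outStep' w (L : Int)) (acc, (prev : Int))).1
        = acc ++ segs w prev suf := by
  intro suf
  induction suf with
  | nil => intro s acc prev hne; exact absurd rfl hne
  | cons k rest ih =>
    intro s acc prev _ hlen hbound hprev hsort
    simp only [List.length_cons] at hlen
    push_cast at hlen
    have hp : prev ≤ k := hprev k (by simp)
    have hk : k < w.length := hbound k (by simp)
    match rest, ih, hsort with
    | [], _, _ =>
      simp only [List.map_cons, List.map_nil, PySem.List.enumerate_cons, PySem.List.enumerate_nil,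
        List.foldl_cons, List.foldl_nil]
      have hstep : outStep' w (L : Int) (acc, (prev : Int)) (s, (k : Int))
          = (acc ++ w.drop prev, (prev : Int)) := by
        unfold outStep'
        rw [if_pos (show s = (L : Int) - 1 by
          simp only [List.length_nil] at hlen
          push_cast at hlen
          omega)]
        simp only [PySem.List.len_eq]
        rw [PySem.List.slice_natCast, List.take_of_length_le (by simp)]
      rw [hstep]
      rfl
    | r :: rs, ih, hsort =>
      have hlt : ∀ x ∈ r :: rs, k < x := (List.pairwise_cons.mp hsort).1
      simp only [List.map_cons, PySem.List.enumerate_cons, List.foldl_cons]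
      have hstep : outStep' w (L : Int) (acc, (prev : Int)) (s, (k : Int))
          = (acc ++ ((w.drop prev).take (k + 1 - prev) ++ ['-']), ((k + 1 : Nat) : Int)) := by
        unfold outStep'
        rw [if_neg (show ¬(s = (L : Int) - 1) by
          simp only [List.length_cons] at hlen
          push_cast at hlen
          omega)]
        rw [show ((s, (k : Int)).2 + 1) = ((k + 1 : Nat) : Int) by push_cast; ring]
        rw [PySem.List.slice_natCast]
        simp [List.append_assoc]
      rw [hstep]
      have hrec := ih (s + 1) (acc ++ ((w.drop prev).take (k + 1 - prev) ++ ['-'])) (k + 1)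
        (by simp)
        (by simp only [List.length_cons] at hlen ⊢; push_cast at hlen ⊢; omega)
        (fun x hx => hbound x (by simp [hx]))
        (fun x hx => by have := hlt x hx; omega)
        (List.pairwise_cons.mp hsort).2
      simp only [List.map_cons, PySem.List.enumerate_cons, List.foldl_cons] at hrec
      rw [hrec]
      rw [show segs w prev (k :: r :: rs)
            = ((w.drop prev).take (k + 1 - prev) ++ ['-']) ++ segs w (k + 1) (r :: rs) from rfl]
      simp [List.append_assoc]

theorem flatten_singletons {α : Type} (f : Nat → α) (l : List Nat) :
    (l.map (fun j => [f j])).flatten = l.map f := by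
  induction l with
  | nil => simp
  | cons a t iht => simp [iht]

theorem chars_block (w : List Char) (m : Nat) : ∀ s, s + m ≤ w.length →
    (List.range' s m).map (fun j => w.getD j ' ') = (w.drop s).take m := by
  induction m with
  | zero => simp
  | succ m ih =>
    intro s hs
    rw [List.range'_succ, List.map_cons, ih (s+1) (by omega)]
    conv_rhs => rw [List.drop_eq_getElem_cons (show s < w.length by omega)]
    rw [List.take_succ_cons]
    congr 1
    rw [List.getD_eq_getElem?_getD, List.getElem?_eq_getElem (by omega)]
    rfl

theorem mem_dropLast_iff {l : List Nat} (hne : l ≠ []) (hnd : l.Nodup) (j : Nat) :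
    j ∈ l.dropLast ↔ j ∈ l ∧ j ≠ l.getLast hne := by
  have h1 : l.dropLast ++ [l.getLast hne] = l := List.dropLast_concat_getLast hne
  have hnl : l.getLast hne ∉ l.dropLast := by
    have h2 := hnd
    rw [← h1] at h2
    intro hmem
    exact ((List.nodup_append.mp h2).2.2 _ hmem _ (List.mem_singleton_self _)) rfl
  have hm : j ∈ l ↔ j ∈ l.dropLast ∨ j = l.getLast hne := by
    conv_lhs => rw [← h1]
    simp
  constructor
  · intro h
    exact ⟨hm.mpr (Or.inl h), fun he => hnl (he ▸ h)⟩
  · rintro ⟨h, hne2⟩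
    rcases hm.mp h with h | h
    · exact h
    · exact absurd h hne2

theorem segs_core (w : List Char) : ∀ (ks0 : List Nat) (prev : Nat), ks0 ≠ [] →
    ks0.Pairwise (· < ·) → (∀ k ∈ ks0, k < w.length) → (∀ k ∈ ks0, prev ≤ k) →
    ((List.range' prev (w.length - prev)).map
        (fun j => w.getD j ' ' :: (if j ∈ ks0.dropLast then ['-'] else []))).flatten
      = segs w prev ks0 := by
  intro ks0
  induction ks0 with
  | nil => simp
  | cons k rest ih =>
    intro prev _ hsort hbound hprev
    match rest, ih with
    | [], _ =>
      have hk : k < w.length := hbound k (by simp)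
      have hp : prev ≤ k := hprev k (by simp)
      have h2 : ∀ (l : List Nat), (l.map (fun j => w.getD j ' ' ::
          if j ∈ ([k] : List Nat).dropLast then ['-'] else [])).flatten
          = l.map (fun j => w.getD j ' ') := by
        intro l
        induction l with
        | nil => simp
        | cons a t iht => simp_all
      rw [h2, chars_block w (w.length - prev) prev (by omega)]
      rw [show segs w prev [k] = w.drop prev from rfl]
      exact List.take_of_length_le (by simp)
    | k2 :: rest2, ih =>
      have hk : k < w.length := hbound k (by simp)
      have hp : prev ≤ k := hprev k (by simp)
      have hk2 : k < k2 := (List.pairwise_cons.mp hsort).1 k2 (by simp)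
      have hlt : ∀ x ∈ k2 :: rest2, k < x := (List.pairwise_cons.mp hsort).1
      have hsplit : List.range' prev (w.length - prev)
          = List.range' prev (k + 1 - prev) ++ List.range' (k + 1) (w.length - (k + 1)) := by
        have h := @List.range'_append_1 prev (k + 1 - prev) (w.length - (k + 1))
        rw [show prev + (k + 1 - prev) = k + 1 by omega] at h
        rw [show w.length - prev = k + 1 - prev + (w.length - (k + 1)) by omega]
        exact h.symm
      rw [hsplit, List.map_append, List.flatten_append]
      have hdl : (k :: k2 :: rest2).dropLast = k :: (k2 :: rest2).dropLast := by
        simp [List.dropLast]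
      have hfirst : (List.range' prev (k + 1 - prev)).map
          (fun j => w.getD j ' ' :: (if j ∈ (k :: k2 :: rest2).dropLast then ['-'] else []))
          = (List.range' prev (k - prev)).map (fun j => [w.getD j ' ']) ++ [[w.getD k ' ', '-']] := by
        have hr : List.range' prev (k + 1 - prev) = List.range' prev (k - prev) ++ [k] := by
          rw [show k + 1 - prev = (k - prev) + 1 by omega, List.range'_1_concat]
          congr 2
          omega
        rw [hr, List.map_append]
        congr 1
        · apply List.map_congr_left
          intro j hj
          have hjr := List.mem_range'_1.mp hj
          have hjk : j < k := by omega
          rw [hdl]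
          rw [if_neg]
          intro hmem
          rcases List.mem_cons.mp hmem with h | h
          · omega
          · have := hlt j (List.mem_of_mem_dropLast h)
            omega
        · simp [hdl]
      rw [hfirst]
      have hsecond : (List.range' (k+1) (w.length - (k + 1))).map
          (fun j => w.getD j ' ' :: (if j ∈ (k :: k2 :: rest2).dropLast then ['-'] else []))
          = (List.range' (k+1) (w.length - (k + 1))).map
          (fun j => w.getD j ' ' :: (if j ∈ (k2 :: rest2).dropLast then ['-'] else [])) := by
        apply List.map_congr_left
        intro j hj
        have hjr := List.mem_range'_1.mp hj
        rw [hdl]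
        congr 1
        have : (j ∈ k :: (k2 :: rest2).dropLast) ↔ (j ∈ (k2 :: rest2).dropLast) := by
          simp only [List.mem_cons]
          constructor
          · rintro (h | h)
            · omega
            · exact h
          · intro h
            exact Or.inr h
        simp only [this]
      rw [hsecond, ih (k+1) (by simp) (List.pairwise_cons.mp hsort).2
        (fun x hx => hbound x (by simp [hx])) (fun x hx => hlt x hx)]
      rw [show segs w prev (k :: k2 :: rest2)
            = ((w.drop prev).take (k + 1 - prev) ++ ['-']) ++ segs w (k+1) (k2 :: rest2) from rfl]
      congr 1
      rw [← chars_block w (k + 1 - prev) prev (by omega)]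
      have hr : List.range' prev (k + 1 - prev) = List.range' prev (k - prev) ++ [k] := by
        rw [show k + 1 - prev = (k - prev) + 1 by omega, List.range'_1_concat]
        congr 2
        omega
      rw [hr]
      simp
      exact flatten_singletons (fun j => w[j]?.getD ' ') _

theorem join_nil_flatten (ps : List (List Char)) : PySem.Chars.join [] ps = ps.flatten := by
  show List.intercalate [] ps = ps.flatten
  rw [List.intercalate]
  induction ps with
  | nil => rfl
  | cons p ps ih =>
    cases ps with
    | nil => simp
    | cons q qs => simp_all [List.intersperse]

-- B's per-character join produces the same segments
theorem outB_eq_segs (w : List Char) (ks0 : List Nat) (hne : ks0 ≠ [])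
    (hsort : ks0.Pairwise (· < ·)) (hbound : ∀ k ∈ ks0, k < w.length)
    (hmem : ∀ j, j < w.length → (isKeyB w (j : Int) = true ↔ j ∈ ks0)) :
    PySem.Chars.join [] ((PySem.List.pyRange 0 (w.length : Int) 1).map (fun j =>
        [PySem.List.pyGetD w j ' '] ++
          (if decide (j ≠ ((ks0.getLast hne : Nat) : Int)) && isKeyB w j then ['-'] else [])))
      = segs w 0 ks0 := by
  have hnd : ks0.Nodup := hsort.imp (fun h => Nat.ne_of_lt h)
  rw [PySem.List.pyRange_zero_nat, List.map_map, join_nil_flatten]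
  rw [show List.range w.length = List.range' 0 w.length from List.range_eq_range']
  have hcongr : ∀ j ∈ List.range' 0 w.length,
      ((fun (jI : Int) => [PySem.List.pyGetD w jI ' '] ++
          (if decide (jI ≠ ((ks0.getLast hne : Nat) : Int)) && isKeyB w jI then ['-'] else []))
        ∘ (fun (k : Nat) => (k : Int))) j
      = w.getD j ' ' :: (if j ∈ ks0.dropLast then ['-'] else []) := by
    intro j hj
    have hjn : j < w.length := by
      have := List.mem_range'_1.mp hj
      omega
    simp only [Function.comp_apply, PySem.List.pyGetD_natCast]
    by_cases hmemd : j ∈ ks0.dropLast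
    · rw [if_pos hmemd]
      have hj2 := (mem_dropLast_iff hne hnd j).mp hmemd
      have hkey : isKeyB w (j : Int) = true := (hmem j hjn).mpr hj2.1
      have hlast : decide ((j : Int) ≠ ((ks0.getLast hne : Nat) : Int)) = true := by
        simp [hj2.2]
      rw [hkey, hlast]
      rfl
    · rw [if_neg hmemd]
      by_cases hkey : j ∈ ks0
      · have hjl : j = ks0.getLast hne := by
          by_contra hne2
          exact hmemd ((mem_dropLast_iff hne hnd j).mpr ⟨hkey, hne2⟩)
        have hl : decide ((j : Int) ≠ ((ks0.getLast hne : Nat) : Int)) = false := by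
          simp [hjl]
        rw [hl]
        simp
      · have hk : isKeyB w (j : Int) = false := by
          cases h : isKeyB w (j : Int)
          · rfl
          · exact absurd ((hmem j hjn).mp h) hkey
        rw [hk]
        simp
  rw [List.map_congr_left hcongr]
  have h := segs_core w ks0 0 hne hsort hbound (fun k _ => Nat.zero_le k)
  rw [show w.length - 0 = w.length from rfl] at h
  exact h

-- B's backwards search finds the last key
theorem lastB_eq (w : List Char) :
    ((PySem.List.pyRange ((w.length : Int) - 1) (-1) (-1)).find? (fun j => isKeyB w j))
      = (keyList w).getLast?.map (fun j => (j : Int)) := by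
  rw [PySem.List.pyRange_neg_one_eq_reverse]
  norm_num
  rw [PySem.List.pyRange_zero_nat, ← List.map_reverse, List.find?_map, ← List.getLast?_filter]
  simp [keyList, Function.comp_def]
  rw [Option.map_eq_bind]
  rfl

theorem lastB_none (w : List Char) (h : keyList w = []) :
    (((PySem.List.pyRange ((w.length : Int) - 1) (-1) (-1)).find? (fun j => isKeyB w j)).getD (-1))
      = -1 := by
  rw [lastB_eq w, h]
  rfl

theorem lastB_some (w : List Char) (hne : keyList w ≠ []) :
    (((PySem.List.pyRange ((w.length : Int) - 1) (-1) (-1)).find? (fun j => isKeyB w j)).getD (-1))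
      = (((keyList w).getLast hne : Nat) : Int) := by
  rw [lastB_eq w, List.getLast?_eq_some_getLast hne]
  rfl

-- reduce A's match on word[0] once its value is known
theorem markA_eq (word : String) (c0 : Char)
    (h : PySem.List.pyGet? (PySem.Chars.lower word.toList) 0 = some c0) :
    mark_syllables word
      = (let w := PySem.Chars.lower word.toList
         let syl := (PySem.List.pyRange 1 (PySem.List.len w) 1).foldl (sylStep w)
           (if isVowel c0 then (PySem.Dict.empty).insert 0 c0 else PySem.Dict.empty)
         if PySem.Dict.size syl = 0 then String.ofList w
         else
           let ks := PySem.Dict.keys syl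
           String.ofList
             (((PySem.List.pyRange 0 (PySem.List.len ks) 1).foldl (outStep w ks) ([], 0)).1)) := by
  simp only [mark_syllables]
  rw [h]

-- ===== VERDICT (by name: the statement is the Claim_ definition above) =====
theorem mark_syllables_spec : Claim_equal_mark_syllables := by
  unfold Claim_equal_mark_syllables
  intro word _ hpre
  unfold Pre_mark_syllables at hpre
  unfold Spec_mark_syllables
  set w := PySem.Chars.lower word.toList with hw
  have hwln : w.length = word.toList.length := by
    rw [hw]
    simp [PySem.Chars.lower]
  have htl : word.toList ≠ [] := by
    intro hl
    apply hpre
    have := congrArg String.ofList hl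
    rwa [String.ofList_toList] at this
  have hwne : w ≠ [] := by
    intro h
    apply htl
    have : w.length = 0 := by rw [h]; rfl
    rw [hwln] at this
    exact List.length_eq_zero_iff.mp this
  have hn1 : 1 ≤ w.length := List.length_pos_iff.mpr hwne
  rcases List.exists_cons_of_ne_nil hwne with ⟨c0, tl, hctl⟩
  have hget : PySem.List.pyGet? w 0 = some c0 := by
    rw [hctl]
    exact PySem.List.pyGet?_zero_cons c0 tl
  rw [markA_eq word c0 (by rw [← hw]; exact hget)]
  simp only [mark_syllables_alt, PySem.List.len_eq]
  have h0 : w.getD 0 ' ' = c0 := by rw [hctl]; rfl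
  have hitems := sylA_items w c0 h0 w.length hn1 (le_refl _)
  have hc2 : cond2 w (w.length - 1) = false := by
    unfold cond2
    rw [show (((w.length - 1 : Nat)) : Int) = (w.length : Int) - 1 by omega]
    simp
  rw [shifted_false_of_cond2_false w _ hc2] at hitems
  simp only [Bool.false_eq_true, if_false, List.append_nil] at hitems
  set SYL := (PySem.List.pyRange 1 ((w.length : Nat) : Int) 1).foldl (sylStep w)
      (if isVowel c0 = true then (PySem.Dict.empty).insert 0 c0 else PySem.Dict.empty) with hSYL
  set ks0 := keyList w with hks0
  have hitems' : SYL.items = ks0.map (fun (j : Nat) => ((j : Int), w.getD j ' ')) := hitems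
  have hkeysA : SYL.keys = ks0.map (fun (j : Nat) => (j : Int)) := by
    show SYL.items.map Prod.fst = _
    rw [hitems', List.map_map]
    rfl
  have hsz : PySem.Dict.size SYL = ks0.length := by
    show SYL.items.length = _
    rw [hitems']
    simp
  have hsort0 : ks0.Pairwise (· < ·) :=
    List.Pairwise.sublist List.filter_sublist List.pairwise_lt_range
  have hbound0 : ∀ k ∈ ks0, k < w.length := by
    intro k hk
    rw [hks0] at hk
    unfold keyList at hk
    rw [List.mem_filter, List.mem_range] at hk
    exact hk.1
  have hmem0 : ∀ j, j < w.length → (isKeyB w (j : Int) = true ↔ j ∈ ks0) := by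
    intro j hj
    rw [hks0]
    unfold keyList
    rw [List.mem_filter, List.mem_range]
    constructor
    · intro h
      exact ⟨hj, h⟩
    · intro h
      exact h.2
  simp only [← hw]
  by_cases hks : ks0 = []
  · simp only [lastB_none w (hks0 ▸ hks)]
    rw [if_pos (by rw [hsz, hks]; rfl)]
    simp
  · have hneK : keyList w ≠ [] := hks0 ▸ hks
    simp only [lastB_some w hneK, ← hks0]
    rw [if_neg (by
      rw [hsz]
      intro h
      exact hks (List.length_eq_zero_iff.mp h))]
    rw [if_neg (by
      intro h
      have : (0 : Int) ≤ ((ks0.getLast hks : Nat) : Int) := by positivity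
      omega)]
    rw [hkeysA]
    have hfold : (PySem.List.pyRange 0 (PySem.List.len (ks0.map (fun (j : Nat) => (j : Int)))) 1).foldl
        (outStep w (ks0.map (fun (j : Nat) => (j : Int)))) ([], 0)
        = (PySem.List.enumerate (ks0.map (fun (j : Nat) => (j : Int))) 0).foldl
          (outStep' w (PySem.List.len (ks0.map (fun (j : Nat) => (j : Int))))) ([], 0) := by
      rw [PySem.List.enumerate_eq_map_pyRange (d := 0)]
      exact (List.foldl_map
        (f := fun i => (i, PySem.List.pyGetD (ks0.map (fun (j : Nat) => (j : Int))) i 0))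
        (g := outStep' w (PySem.List.len (ks0.map (fun (j : Nat) => (j : Int)))))).symm
    simp only [PySem.List.len_eq, List.length_map] at hfold ⊢
    rw [hfold]
    have houtA := outA_loop w ks0.length ks0 0 [] 0 hks (by simp) hbound0
      (fun k _ => Nat.zero_le k) hsort0
    simp only [Nat.cast_zero] at houtA
    rw [houtA]
    rw [List.nil_append]
    have houtB := outB_eq_segs w ks0 hks hsort0 hbound0 hmem0
    rw [houtB]
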